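-- pv_equiv track=rewrite | github.com/shemah77/backend_test_homework | Sprint 5 Final cypher.py | parenthetic_contents
-- ===== SOURCE A (Python) =====
-- def parenthetic_contents(string):
--     """Generate parenthesized contents in string as pairs (level, contents)."""
--     stack = []
--     for i, c in enumerate(string):
--         if c == '[':
--             stack.append(i)
--         elif c == ']' and stack:
--             start = stack.pop()
--             yield (len(stack), string[start + 1: i])
-- ===== SOURCE B (Python) =====
-- def parenthetic_contents(string):
--     """Recursive-descent parser: scan with an index, recurse on '[' for the
--     nested region, emit (depth, contents) at each matching ']' (post-order,
--     i.e. in closing-bracket order); stray ']' and unclosed '[' are dropped."""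
--     def parse(i, depth, out):
--         start = i
--         while i < len(string):
--             c = string[i]
--             if c == '[':
--                 i = parse(i + 1, depth + 1, out)
--             elif c == ']' and depth > 0:
--                 out.append((depth - 1, string[start:i]))
--                 return i + 1
--             else:
--                 i += 1
--         return i
--     out = []
--     parse(0, 0, out)
--     return out
-- ===== Notes on version B (the rewrite author's own statement) =====
-- stated objective: alternative
-- what changed: Replaces the explicit index-stack scan with a recursive-descent parser that recurses on '[' and emits each (depth, contents) pair at its matching ']'; the original Python is a generator, B returns the list of its yielded pairs.
import Mathlib
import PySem

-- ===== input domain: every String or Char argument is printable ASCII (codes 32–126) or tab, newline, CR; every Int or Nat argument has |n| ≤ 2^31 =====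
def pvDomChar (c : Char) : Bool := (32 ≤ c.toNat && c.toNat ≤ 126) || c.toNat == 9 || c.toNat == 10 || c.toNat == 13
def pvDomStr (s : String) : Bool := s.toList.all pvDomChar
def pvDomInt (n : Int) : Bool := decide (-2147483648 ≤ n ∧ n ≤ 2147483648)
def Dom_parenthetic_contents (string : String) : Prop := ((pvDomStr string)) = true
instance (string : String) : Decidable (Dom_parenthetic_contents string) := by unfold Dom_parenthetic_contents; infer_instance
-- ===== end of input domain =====

-- B replaces A's explicit index-stack scan with a recursive-descent parser (alternative
-- decomposition, no speed claim); A is a Python generator, both ports return the list of its pairs.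

-- ===== PORT A =====
-- A's for-loop over enumerate(string): structural recursion carrying the index i and the
-- remaining characters; stack of '['-indices with its top at the head (Python append/pop at the end).
def goA (cs : List Char) : Nat → List Char → List Nat → List (Int × String) → List (Int × String)
  | _, [], _, out => out
  | i, c :: rest, stack, out =>
    if c = '[' then
      goA cs (i + 1) rest (i :: stack) out
    else if c = ']' then
      match stack with
      | [] => goA cs (i + 1) rest [] out        -- 'and stack' false: no yield
      | p :: st =>                               -- start = stack.pop(); yield (len(stack), string[start+1:i])
        goA cs (i + 1) rest st
          (out ++ [((st.length : Int), String.mk (PySem.List.slice cs (some ((p : Int) + 1)) (some (i : Int))))])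
    else goA cs (i + 1) rest stack out

def parenthetic_contents (string : String) : List (Int × String) :=
  goA string.toList 0 string.toList [] []

-- ===== PORT B =====
-- Source B's inner parse(i, depth, out): the while loop and the recursive call on '[' become one
-- fuel-guarded recursion (fuel is pure bookkeeping for termination; 2*len+1 is always enough).
def parseB (cs : List Char) (fuel i start depth : Nat) (out : List (Int × String)) : Nat × List (Int × String) :=
  match fuel with
  | 0 => (i, out)
  | f + 1 =>
    match cs[i]? with
    | none => (i, out)
    | some c =>
      if c = '[' then
        let r := parseB cs f (i + 1) (i + 1) (depth + 1) out
        parseB cs f r.1 start depth r.2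
      else if c = ']' ∧ 0 < depth then
        (i + 1, out ++ [(((depth : Int) - 1), String.mk (PySem.List.slice cs (some ((start : Int))) (some ((i : Int)))))])
      else parseB cs f (i + 1) start depth out

def parenthetic_contents_alt (string : String) : List (Int × String) :=
  (parseB string.toList (2 * string.toList.length + 1) 0 0 0 []).2

-- ===== PRECONDITION & SPEC =====
def Spec_parenthetic_contents (string : String) (out : List (Int × String)) : Prop := out = parenthetic_contents_alt string
instance (string : String) (out : List (Int × String)) : Decidable (Spec_parenthetic_contents string out) := by unfold Spec_parenthetic_contents; infer_instance

-- ===== CLAIM (what is proved, stated in full; the proofs are below) =====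
def Claim_equal_parenthetic_contents : Prop := ∀ (string : String), Dom_parenthetic_contents string → Spec_parenthetic_contents string (parenthetic_contents string)

-- ===== LEMMAS AND PROOFS =====

-- One-step equations for parseB (controlled unfolding).
theorem parseB_succ (cs : List Char) (f i start depth : Nat) (out : List (Int × String)) :
    parseB cs (f + 1) i start depth out = (match cs[i]? with
      | none => (i, out)
      | some c =>
        if c = '[' then
          let r := parseB cs f (i + 1) (i + 1) (depth + 1) out
          parseB cs f r.1 start depth r.2
        else if c = ']' ∧ 0 < depth then
          (i + 1, out ++ [(((depth : Int) - 1), String.mk (PySem.List.slice cs (some ((start : Int))) (some ((i : Int)))))])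
        else parseB cs f (i + 1) start depth out) := rfl

theorem parseB_none (cs : List Char) (f i start depth : Nat) (out : List (Int × String))
    (h : cs[i]? = none) : parseB cs (f + 1) i start depth out = (i, out) := by
  rw [parseB_succ, h]

theorem parseB_open (cs : List Char) (f i start depth : Nat) (out : List (Int × String))
    (h : cs[i]? = some '[') :
    parseB cs (f + 1) i start depth out
      = parseB cs f (parseB cs f (i + 1) (i + 1) (depth + 1) out).1 start depth
          (parseB cs f (i + 1) (i + 1) (depth + 1) out).2 := by
  rw [parseB_succ, h]
  simp

theorem parseB_close (cs : List Char) (f i start depth : Nat) (out : List (Int × String))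
    (h : cs[i]? = some ']') (hd : 0 < depth) :
    parseB cs (f + 1) i start depth out
      = (i + 1, out ++ [(((depth : Int) - 1), String.mk (PySem.List.slice cs (some ((start : Int))) (some ((i : Int)))))]) := by
  rw [parseB_succ, h]
  simp [hd]

theorem parseB_skip (cs : List Char) (f i start depth : Nat) (out : List (Int × String)) (c : Char)
    (h : cs[i]? = some c) (hb : c ≠ '[') (hnc : ¬(c = ']' ∧ 0 < depth)) :
    parseB cs (f + 1) i start depth out = parseB cs f (i + 1) start depth out := by
  rw [parseB_succ, h]
  simp [hb, hnc]

-- parseB never moves the index backwards.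
theorem parseB_fst_ge (cs : List Char) (fuel : Nat) : ∀ i start depth out,
    i ≤ (parseB cs fuel i start depth out).1 := by
  induction fuel with
  | zero => intro i start depth out; simp [parseB]
  | succ f ih =>
    intro i start depth out
    cases h : cs[i]? with
    | none => rw [parseB_none cs f i start depth out h]
    | some c =>
      by_cases hb : c = '['
      · subst hb
        rw [parseB_open cs f i start depth out h]
        have h1 := ih (i + 1) (i + 1) (depth + 1) out
        have h2 := ih (parseB cs f (i + 1) (i + 1) (depth + 1) out).1 start depth
          (parseB cs f (i + 1) (i + 1) (depth + 1) out).2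
        omega
      · by_cases hc : c = ']' ∧ 0 < depth
        · obtain ⟨hceq, hdpos⟩ := hc
          rw [hceq] at h
          rw [parseB_close cs f i start depth out h hdpos]
          omega
        · rw [parseB_skip cs f i start depth out c h hb hc]
          have := ih (i + 1) start depth out
          omega

theorem parseB_stuck (cs : List Char) (i start depth : Nat) (out : List (Int × String))
    (h : cs[i]? = none) : ∀ f, parseB cs f i start depth out = (i, out) := by
  intro f
  cases f with
  | zero => rfl
  | succ f' => exact parseB_none cs f' i start depth out h

-- The result does not depend on the fuel, as long as it is at least 2*(len - i).
theorem parseB_stable (cs : List Char) : ∀ n f g i start depth out,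
    cs.length - i ≤ n → 2 * (cs.length - i) ≤ f → 2 * (cs.length - i) ≤ g →
    parseB cs f i start depth out = parseB cs g i start depth out := by
  intro n
  induction n with
  | zero =>
    intro f g i start depth out hn hf hg
    have hnone : cs[i]? = none := by
      rw [List.getElem?_eq_none_iff]; omega
    rw [parseB_stuck cs i start depth out hnone f, parseB_stuck cs i start depth out hnone g]
  | succ n ih =>
    intro f g i start depth out hn hf hg
    by_cases hi : i < cs.length
    · obtain ⟨f', rfl⟩ : ∃ f', f = f' + 1 := ⟨f - 1, by omega⟩
      obtain ⟨g', rfl⟩ : ∃ g', g = g' + 1 := ⟨g - 1, by omega⟩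
      have hsome : cs[i]? = some cs[i] := List.getElem?_eq_getElem hi
      by_cases hb : cs[i] = '['
      · rw [hb] at hsome
        rw [parseB_open cs f' i start depth out hsome, parseB_open cs g' i start depth out hsome]
        have hinner : parseB cs f' (i + 1) (i + 1) (depth + 1) out
            = parseB cs g' (i + 1) (i + 1) (depth + 1) out := by
          apply ih <;> omega
        rw [hinner]
        have hge : i + 1 ≤ (parseB cs g' (i + 1) (i + 1) (depth + 1) out).1 :=
          parseB_fst_ge cs g' (i + 1) (i + 1) (depth + 1) out
        apply ih <;> omega
      · by_cases hc : cs[i] = ']' ∧ 0 < depth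
        · obtain ⟨hceq, hdpos⟩ := hc
          rw [hceq] at hsome
          rw [parseB_close cs f' i start depth out hsome hdpos,
            parseB_close cs g' i start depth out hsome hdpos]
        · rw [parseB_skip cs f' i start depth out cs[i] hsome hb hc,
            parseB_skip cs g' i start depth out cs[i] hsome hb hc]
          apply ih <;> omega
    · have hnone : cs[i]? = none := by
        rw [List.getElem?_eq_none_iff]; omega
      rw [parseB_stuck cs i start depth out hnone f, parseB_stuck cs i start depth out hnone g]

-- Resume B's suspended call stack: one parseB frame per open '[' (opened at p, so start = p+1,
-- depth = frames below it + 1), innermost first; the bottom (depth-0) frame has start = 0.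
def resumeB (cs : List Char) : List Nat -> Nat -> List (Int × String) -> List (Int × String)
  | [], i, out => (parseB cs (2 * cs.length + 1) i 0 0 out).2
  | p :: st, i, out =>
    resumeB cs st (parseB cs (2 * cs.length + 1) i (p + 1) (st.length + 1) out).1
      (parseB cs (2 * cs.length + 1) i (p + 1) (st.length + 1) out).2

theorem resumeB_end (cs : List Char) : ∀ stack i out, cs.length ≤ i →
    resumeB cs stack i out = out := by
  intro stack
  induction stack with
  | nil =>
    intro i out hi
    have hnone : cs[i]? = none := by rw [List.getElem?_eq_none_iff]; omega
    simp only [resumeB]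
    rw [parseB_none cs _ i 0 0 out hnone]
  | cons p st ih =>
    intro i out hi
    simp only [resumeB]
    have hnone : cs[i]? = none := by rw [List.getElem?_eq_none_iff]; omega
    rw [parseB_none cs _ i (p + 1) (st.length + 1) out hnone]
    exact ih i out hi

-- Fuel restoration: one step down from 2*len+1, positions ≥ 1 still have enough fuel.
theorem parseB_refuel (cs : List Char) (j start depth : Nat) (out : List (Int × String))
    (hj : 1 ≤ j) :
    parseB cs (2 * cs.length) j start depth out
      = parseB cs (2 * cs.length + 1) j start depth out := by
  apply parseB_stable cs cs.length <;> omega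

-- Stepping lemmas: how resumeB moves when the next character is read.
theorem resumeB_open (cs : List Char) (stack : List Nat) (i : Nat) (out : List (Int × String))
    (hi : i < cs.length) (hc : cs[i] = '[') :
    resumeB cs stack i out = resumeB cs (i :: stack) (i + 1) out := by
  have hsome : cs[i]? = some '[' := by rw [List.getElem?_eq_getElem hi, hc]
  cases stack with
  | nil =>
    simp only [resumeB, List.length_nil]
    rw [parseB_open cs (2 * cs.length) i 0 0 out hsome]
    rw [parseB_refuel cs (i + 1) (i + 1) (0 + 1) out (by omega)]
    have hge : i + 1 ≤ (parseB cs (2 * cs.length + 1) (i + 1) (i + 1) (0 + 1) out).1 :=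
      parseB_fst_ge cs _ (i + 1) (i + 1) (0 + 1) out
    rw [parseB_refuel cs (parseB cs (2 * cs.length + 1) (i + 1) (i + 1) (0 + 1) out).1 0 0
      (parseB cs (2 * cs.length + 1) (i + 1) (i + 1) (0 + 1) out).2 (by omega)]
  | cons p st =>
    simp only [resumeB, List.length_cons]
    rw [parseB_open cs (2 * cs.length) i (p + 1) (st.length + 1) out hsome]
    rw [parseB_refuel cs (i + 1) (i + 1) (st.length + 1 + 1) out (by omega)]
    have hge : i + 1 ≤ (parseB cs (2 * cs.length + 1) (i + 1) (i + 1) (st.length + 1 + 1) out).1 :=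
      parseB_fst_ge cs _ (i + 1) (i + 1) (st.length + 1 + 1) out
    rw [parseB_refuel cs (parseB cs (2 * cs.length + 1) (i + 1) (i + 1) (st.length + 1 + 1) out).1
      (p + 1) (st.length + 1)
      (parseB cs (2 * cs.length + 1) (i + 1) (i + 1) (st.length + 1 + 1) out).2 (by omega)]

theorem resumeB_close (cs : List Char) (p : Nat) (st : List Nat) (i : Nat)
    (out : List (Int × String)) (hi : i < cs.length) (hc : cs[i] = ']') :
    resumeB cs (p :: st) i out
      = resumeB cs st (i + 1)
          (out ++ [((((st.length + 1 : Nat) : Int) - 1),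
            String.mk (PySem.List.slice cs (some (((p + 1 : Nat) : Int))) (some ((i : Int)))))]) := by
  have hsome : cs[i]? = some ']' := by rw [List.getElem?_eq_getElem hi, hc]
  simp only [resumeB, List.length_cons]
  rw [parseB_close cs (2 * cs.length) i (p + 1) (st.length + 1) out hsome (by omega)]

theorem resumeB_skip (cs : List Char) (stack : List Nat) (i : Nat) (out : List (Int × String))
    (c : Char) (hi : i < cs.length) (hcc : cs[i] = c) (hb : c ≠ '[')
    (hcl : stack = [] ∨ c ≠ ']') :
    resumeB cs stack i out = resumeB cs stack (i + 1) out := by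
  have hsome : cs[i]? = some c := by rw [List.getElem?_eq_getElem hi, hcc]
  cases stack with
  | nil =>
    simp only [resumeB]
    rw [parseB_skip cs (2 * cs.length) i 0 0 out c hsome hb (by simp)]
    rw [parseB_refuel cs (i + 1) 0 0 out (by omega)]
  | cons p st =>
    have hcl' : c ≠ ']' := by
      rcases hcl with h | h
      · exact absurd h (by simp)
      · exact h
    simp only [resumeB, List.length_cons]
    rw [parseB_skip cs (2 * cs.length) i (p + 1) (st.length + 1) out c hsome hb (by simp [hcl'])]
    rw [parseB_refuel cs (i + 1) (p + 1) (st.length + 1) out (by omega)]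

-- Main invariant: A's loop from position i with A's stack equals resuming B's matching frames.
theorem main_inv (cs : List Char) : ∀ n i stack out, cs.length - i ≤ n →
    goA cs i (cs.drop i) stack out = resumeB cs stack i out := by
  intro n
  induction n with
  | zero =>
    intro i stack out hn
    have hi : cs.length ≤ i := by omega
    rw [List.drop_eq_nil_of_le hi]
    simp only [goA]
    exact (resumeB_end cs stack i out hi).symm
  | succ n ih =>
    intro i stack out hn
    by_cases hi : i < cs.length
    · have hcons := List.getElem_cons_drop hi
      by_cases hb : cs[i] = '['
      · have hstep : goA cs i (cs.drop i) stack out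
            = goA cs (i + 1) (cs.drop (i + 1)) (i :: stack) out := by
          rw [← hcons, hb]; simp [goA]
        rw [hstep, ih (i + 1) (i :: stack) out (by omega),
          resumeB_open cs stack i out hi hb]
      · by_cases hc : cs[i] = ']'
        · cases stack with
          | nil =>
            have hstep : goA cs i (cs.drop i) [] out
                = goA cs (i + 1) (cs.drop (i + 1)) [] out := by
              rw [← hcons, hc]; simp [goA]
            rw [hstep, ih (i + 1) [] out (by omega),
              resumeB_skip cs [] i out ']' hi hc (by simp) (Or.inl rfl)]
          | cons p st =>
            have hstep : goA cs i (cs.drop i) (p :: st) out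
                = goA cs (i + 1) (cs.drop (i + 1)) st
                    (out ++ [((st.length : Int),
                      String.mk (PySem.List.slice cs (some ((p : Int) + 1)) (some (i : Int))))]) := by
              rw [← hcons, hc]; simp [goA]
            rw [hstep, ih (i + 1) st _ (by omega),
              resumeB_close cs p st i out hi hc]
            have h1 : ((st.length + 1 : Nat) : Int) - 1 = (st.length : Int) := by push_cast; ring
            have h2 : ((p + 1 : Nat) : Int) = (p : Int) + 1 := by push_cast; ring
            rw [h1, h2]
        · have hstep : goA cs i (cs.drop i) stack out
              = goA cs (i + 1) (cs.drop (i + 1)) stack out := by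
            rw [← hcons]; simp [goA, hb, hc]
          rw [hstep, ih (i + 1) stack out (by omega),
            resumeB_skip cs stack i out cs[i] hi rfl hb (Or.inr hc)]
    · rw [List.drop_eq_nil_of_le (by omega)]
      simp only [goA]
      exact (resumeB_end cs stack i out (by omega)).symm

-- ===== VERDICT (by name: the statement is the Claim_ definition above) =====
theorem parenthetic_contents_spec : Claim_equal_parenthetic_contents := by
  intro s _hdom
  unfold Spec_parenthetic_contents parenthetic_contents parenthetic_contents_alt
  have h := main_inv s.toList s.toList.length 0 [] [] (by omega)
  rw [List.drop_zero] at h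
  rw [h]
  rfl
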